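-- pv_equiv track=rewrite | github.com/ezzbreezn/prak3_ML1 | anytask/find_max_substring_occurrence.py | find_max_substring_occurrence
-- ===== SOURCE A (Python) =====
-- def find_max_substring_occurrence(input_string):
--     ls = len(input_string)
--     z = [0 for i in range(ls)]
--     left = 0
--     right = 0
--     for i in range(1, ls):
--         if left <= right:
--             z[i] = min(z[i - left], right - i + 1)
--         while i + z[i] < ls and input_string[z[i]] == input_string[i + z[i]]:
--             z[i] += 1
--         if i + z[i] - 1 > right:
--             left = i
--             right = i + z[i] - 1
--     for i in range(ls):
--         if i + z[i] == ls and ls % i == 0: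
--             return ls // i
--     return 1
-- ===== SOURCE B (Python) =====
-- def find_max_substring_occurrence(input_string):
--     ls = len(input_string)
--     for i in range(1, ls):
--         if ls % i == 0 and input_string[:i] * (ls // i) == input_string:
--             return ls // i
--     return 1
-- ===== Notes on version B (the rewrite author's own statement) =====
-- stated objective: simpler
-- what changed: Replaced the Z-function precomputation (with its left/right box bookkeeping) by a direct scan of candidate period lengths: for ascending i dividing len(s), test s[:i]*(len(s)//i)==s and return len(s)//i at the first hit, else 1.
import Mathlib
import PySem

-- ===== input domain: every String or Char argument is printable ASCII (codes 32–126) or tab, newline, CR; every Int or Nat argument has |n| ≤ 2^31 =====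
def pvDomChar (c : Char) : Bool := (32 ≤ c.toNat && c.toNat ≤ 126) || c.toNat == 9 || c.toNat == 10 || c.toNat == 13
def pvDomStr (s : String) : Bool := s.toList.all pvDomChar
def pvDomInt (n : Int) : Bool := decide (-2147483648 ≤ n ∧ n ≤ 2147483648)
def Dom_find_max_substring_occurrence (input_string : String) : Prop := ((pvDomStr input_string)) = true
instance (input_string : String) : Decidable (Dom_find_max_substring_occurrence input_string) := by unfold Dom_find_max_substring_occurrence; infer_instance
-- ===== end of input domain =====

-- B replaces A's Z-function precomputation by a direct ascending scan of candidate
-- period lengths (objective: simpler). Both are total; return values only, no mutation.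

-- ===== PORT A =====
-- z[k] read (index always in range 0..len-1 here; the getD default is never used)
def pvZGet (z : List Int) (k : Int) : Int := (PySem.List.pyGet? z k).getD 0

-- s[a] == s[b] with Python's negative-index wraparound; `false` on IndexError
-- (unreachable: the loop keeps z ≥ 1 - i > -len, proved below)
def pvCharEq (cs : List Char) (a b : Int) : Bool :=
  match PySem.List.pyGet? cs a, PySem.List.pyGet? cs b with
  | some x, some y => x == y
  | _, _ => false

-- the inner `while i + z[i] < ls and input_string[z[i]] == input_string[i + z[i]]: z[i] += 1`
def pvExtend (cs : List Char) (ls i z : Int) : Int :=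
  if h : i + z < ls ∧ pvCharEq cs z (i + z) = true then pvExtend cs ls i (z + 1) else z
termination_by (ls - (i + z)).toNat
decreasing_by omega

-- the first `for i in range(1, ls)` loop, state = (z, left, right)
def pvZLoop (cs : List Char) (ls i : Int) (z : List Int) (left right : Int) :
    List Int × Int × Int :=
  if h : i < ls then
    let z0 := if left ≤ right then z.set i.toNat (min (pvZGet z (i - left)) (right - i + 1)) else z
    let zi := pvExtend cs ls i (pvZGet z0 i)
    let z1 := z0.set i.toNat zi
    if i + zi - 1 > right then pvZLoop cs ls (i + 1) z1 i (i + zi - 1)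
    else pvZLoop cs ls (i + 1) z1 left right
  else (z, left, right)
termination_by (ls - i).toNat
decreasing_by all_goals omega

-- the second `for i in range(ls)` loop with its early return
def pvScan (ls : Int) (z : List Int) (i : Int) : Int :=
  if _h : i < ls then
    if i + pvZGet z i = ls ∧ PySem.Int.mod ls i = 0 then PySem.Int.floordiv ls i
    else pvScan ls z (i + 1)
  else 1
termination_by (ls - i).toNat
decreasing_by omega

def find_max_substring_occurrence (input_string : String) : Int :=
  let cs := input_string.toList
  let ls : Int := cs.length
  let z : List Int := List.replicate ls.toNat 0
  let st := pvZLoop cs ls 1 z 0 0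
  pvScan ls st.1 0

-- ===== PORT B =====
-- `for i in range(1, ls): if ls % i == 0 and input_string[:i] * (ls // i) == input_string: return ls // i` / `return 1`
def pvBScan (cs : List Char) (ls i : Int) : Int :=
  if _h : i < ls then
    if PySem.Int.mod ls i = 0 ∧
        PySem.List.pyRepeat (PySem.List.slice cs none (some i)) (PySem.Int.floordiv ls i) = cs then
      PySem.Int.floordiv ls i
    else pvBScan cs ls (i + 1)
  else 1
termination_by (ls - i).toNat
decreasing_by omega

def find_max_substring_occurrence_alt (input_string : String) : Int :=
  let cs := input_string.toList
  let ls : Int := cs.length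
  pvBScan cs ls 1

-- ===== PRECONDITION & SPEC =====
def Spec_find_max_substring_occurrence (input_string : String) (out : Int) : Prop := out = find_max_substring_occurrence_alt input_string
instance (input_string : String) (out : Int) : Decidable (Spec_find_max_substring_occurrence input_string out) := by unfold Spec_find_max_substring_occurrence; infer_instance

-- ===== CLAIM (what is proved, stated in full; the proofs are below) =====
def Claim_equal_find_max_substring_occurrence : Prop := ∀ (input_string : String), Dom_find_max_substring_occurrence input_string → Spec_find_max_substring_occurrence input_string (find_max_substring_occurrence input_string)

-- ===== LEMMAS AND PROOFS =====

-- character at an Int index (total helper for the proofs only)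
def pvAt (cs : List Char) (k : Int) : Char := (PySem.List.pyGet? cs k).getD ' '

-- "cs has period p on its whole length", stated over Int indices as the ports see them
def pvPeriod (cs : List Char) (i : Int) : Prop :=
  ∀ k : Int, 0 ≤ k → k + i < (cs.length : Int) → pvCharEq cs k (k + i) = true

lemma pvCharEq_iff_at (cs : List Char) (a b : Int) (ha0 : 0 ≤ a) (ha : a < (cs.length : Int))
    (hb0 : 0 ≤ b) (hb : b < (cs.length : Int)) :
    pvCharEq cs a b = true ↔ pvAt cs a = pvAt cs b := by
  unfold pvCharEq pvAt
  rw [PySem.List.pyGet?_eq_some_getElem cs ha0 ha, PySem.List.pyGet?_eq_some_getElem cs hb0 hb]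
  simp

lemma pvCharEq_neg_iff_at (cs : List Char) (a b : Int) (ha0 : -(cs.length : Int) ≤ a)
    (ha : a < 0) (hb0 : 0 ≤ b) (hb : b < (cs.length : Int)) :
    pvCharEq cs a b = true ↔ pvAt cs ((cs.length : Int) + a) = pvAt cs b := by
  obtain ⟨k, rfl⟩ : ∃ k : Nat, a = -(k : Int) := ⟨(-a).toNat, by omega⟩
  have h1 : PySem.List.pyGet? cs (-(k : Int)) = cs[cs.length - k]? :=
    PySem.List.pyGet?_neg_natCast cs k (by omega) (by omega)
  have h2 : cs.length - k = ((cs.length : Int) + -(k : Int)).toNat := by omega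
  have h3 : PySem.List.pyGet? cs ((cs.length : Int) + -(k : Int))
      = cs[((cs.length : Int) + -(k : Int)).toNat]? := PySem.List.pyGet?_of_nonneg cs (by omega)
  unfold pvCharEq pvAt
  rw [h1, h2, h3, PySem.List.pyGet?_eq_some_getElem cs hb0 hb,
    List.getElem?_eq_getElem (by omega)]
  simp

lemma pvAt_nat (cs : List Char) (a : Nat) (h : a < cs.length) : pvAt cs (a : Int) = cs[a] := by
  unfold pvAt
  rw [PySem.List.pyGet?_eq_some_getElem cs (by omega) (by exact_mod_cast h)]
  simp

lemma pvFlatGet (xs : List Char) (q j : Nat) (h : j < q * xs.length) :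
    ((List.replicate q xs).flatten)[j]? = xs[j % xs.length]? := by
  induction q generalizing j with
  | zero => omega
  | succ q ih =>
    have hmul : (q + 1) * xs.length = q * xs.length + xs.length := Nat.succ_mul q _
    rw [List.replicate_succ, List.flatten_cons]
    rcases Nat.lt_or_ge j xs.length with hj | hj
    · rw [List.getElem?_append_left hj, Nat.mod_eq_of_lt hj]
    · rw [List.getElem?_append_right hj]
      have h2 := ih (j - xs.length) (by omega)
      rw [h2, Nat.mod_eq_sub_mod hj]

lemma pvPeriodGet (cs : List Char) (p : Nat) (hp : 1 ≤ p)
    (hper : ∀ k, k + p < cs.length → cs[k]? = cs[k + p]?) :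
    ∀ j, j < cs.length → cs[j]? = (cs.take p)[j % p]? := by
  intro j
  induction j using Nat.strong_induction_on with
  | _ j ih =>
    intro hj
    rcases Nat.lt_or_ge j p with h | h
    · rw [Nat.mod_eq_of_lt h, List.getElem?_take_of_lt h]
    · have h1 := hper (j - p) (by omega)
      have h2 := ih (j - p) (by omega) (by omega)
      have h3 : j - p + p = j := by omega
      rw [h3] at h1
      rw [← h1, h2, Nat.mod_eq_sub_mod h]

-- ---- pvExtend characterisation ----
lemma pvExtend_le (cs : List Char) (ls i z : Int) : z ≤ pvExtend cs ls i z := by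
  fun_induction pvExtend with
  | case1 z h ih => omega
  | case2 z h => omega

lemma pvExtend_bound (cs : List Char) (ls i z : Int) (h : i + z ≤ ls) :
    i + pvExtend cs ls i z ≤ ls := by
  fun_induction pvExtend with
  | case1 z h ih => exact ih (by omega)
  | case2 z h2 => omega

lemma pvExtend_matches (cs : List Char) (ls i z : Int) :
    ∀ t, z ≤ t → t < pvExtend cs ls i z → i + t < ls ∧ pvCharEq cs t (i + t) = true := by
  fun_induction pvExtend with
  | case1 z h ih =>
    intro t ht1 ht2
    rcases eq_or_lt_of_le ht1 with rfl | hlt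
    · exact h
    · exact ih t (by omega) ht2
  | case2 z h => intro t h1 h2; omega

lemma pvExtend_stop (cs : List Char) (ls i z : Int) :
    ¬ (i + pvExtend cs ls i z < ls ∧ pvCharEq cs (pvExtend cs ls i z) (i + pvExtend cs ls i z) = true) := by
  fun_induction pvExtend with
  | case1 z h ih => exact ih
  | case2 z h => exact h

lemma pvExtend_full (cs : List Char) (ls i z : Int) (hiz : i + z ≤ ls)
    (hall : ∀ t, z ≤ t → t < ls - i → pvCharEq cs t (i + t) = true) :
    pvExtend cs ls i z = ls - i := by
  have h1 := pvExtend_le cs ls i z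
  have h2 := pvExtend_bound cs ls i z hiz
  by_contra hne
  have hlt : pvExtend cs ls i z < ls - i := by omega
  exact pvExtend_stop cs ls i z ⟨by omega, hall _ h1 hlt⟩

lemma pvZGet_set_self (z : List Int) (i v : Int) (h0 : 0 ≤ i) (h : i.toNat < z.length) :
    pvZGet (z.set i.toNat v) i = v := by
  unfold pvZGet
  rw [PySem.List.pyGet?_of_nonneg _ h0, List.getElem?_set_self (by simpa using h)]
  rfl

lemma pvZGet_set_ne (z : List Int) (i v j : Int) (h0 : 0 ≤ i) (hj0 : 0 ≤ j) (hne : j ≠ i) :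
    pvZGet (z.set i.toNat v) j = pvZGet z j := by
  unfold pvZGet
  rw [PySem.List.pyGet?_of_nonneg _ hj0, PySem.List.pyGet?_of_nonneg _ hj0,
    List.getElem?_set_ne (by omega)]

lemma pvZGet_replicate (n : Nat) (k : Int) : pvZGet (List.replicate n (0 : Int)) k = 0 := by
  unfold pvZGet
  cases h : PySem.List.pyGet? (List.replicate n (0 : Int)) k with
  | none => rfl
  | some v =>
    have := PySem.List.mem_of_pyGet?_eq_some _ h
    simp at this
    simp [this]

-- ---- the loop invariant ----
structure PvInv (cs : List Char) (z : List Int) (left right i : Int) : Prop where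
  hlen : z.length = cs.length
  hz0 : pvZGet z 0 = 0
  hl0 : 0 ≤ left
  hli : left < i
  hr0 : 0 ≤ right
  hrls : right < (cs.length : Int)
  hbox : ∀ k : Int, left ≤ k → k ≤ right → pvCharEq cs (k - left) k = true
  hzlow : ∀ j : Int, 1 ≤ j → j < i → 1 - j ≤ pvZGet z j
  hzhigh : ∀ j : Int, 1 ≤ j → j < i → j + pvZGet z j ≤ (cs.length : Int)
  hpos : ∀ j : Int, 1 ≤ j → j < i → ∀ k : Int, 0 ≤ k → k < pvZGet z j →
      pvCharEq cs k (j + k) = true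
  hper : ∀ j : Int, 1 ≤ j → j < i → j < (cs.length : Int) → PySem.Int.mod (cs.length : Int) j = 0 →
      pvPeriod cs j → pvZGet z j = (cs.length : Int) - j
  hzero : ∀ j : Int, i ≤ j → pvZGet z j = 0

-- periodicity propagates along multiples of the period
lemma pvPeriod_congr (cs : List Char) (i : Int) (hi : 1 ≤ i) (hp : pvPeriod cs i) :
    ∀ (q : Nat) (a : Int), 0 ≤ a → a + q * i < (cs.length : Int) →
      pvAt cs a = pvAt cs (a + q * i) := by
  intro q
  induction q with
  | zero => intro a _ _; norm_num
  | succ q ih =>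
    intro a ha0 hlt
    have hqi : 0 ≤ (q : Int) * i := by positivity
    have h1 : a + i < (cs.length : Int) := by push_cast at hlt ⊢; nlinarith
    have hstep : pvAt cs a = pvAt cs (a + i) :=
      (pvCharEq_iff_at cs a (a + i) ha0 (by omega) (by omega) h1).mp (hp a ha0 h1)
    have h2 := ih (a + i) (by omega) (by push_cast at hlt ⊢; ring_nf; ring_nf at hlt; linarith)
    rw [hstep, h2]
    congr 1
    push_cast
    ring

-- one iteration of the outer loop preserves the invariant
lemma pvZLoop_step (cs : List Char) (z : List Int) (left right i : Int)
    (hinv : PvInv cs z left right i) (hi1 : 1 ≤ i) (hils : i < (cs.length : Int)) :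
    let z0 := if left ≤ right then z.set i.toNat (min (pvZGet z (i - left)) (right - i + 1)) else z
    let zi := pvExtend cs (cs.length : Int) i (pvZGet z0 i)
    let z1 := z0.set i.toNat zi
    (i + zi - 1 > right → PvInv cs z1 i (i + zi - 1) (i + 1)) ∧
    (¬ i + zi - 1 > right → PvInv cs z1 left right (i + 1)) := by
  intro z0 zi z1
  obtain ⟨hlen, hz0, hl0, hli, hr0, hrls, hbox, hzlow, hzhigh, hpos, hper, hzero⟩ := hinv
  have hz0def : z0 = if left ≤ right then
      z.set i.toNat (min (pvZGet z (i - left)) (right - i + 1)) else z := rfl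
  have hzidef : zi = pvExtend cs (cs.length : Int) i (pvZGet z0 i) := rfl
  have hz1def : z1 = z0.set i.toNat zi := rfl
  -- length of z0
  have hlen0 : z0.length = cs.length := by
    rw [hz0def]; split_ifs <;> simp [hlen]
  have hitoNat : i.toNat < z.length := by omega
  have hitoNat0 : i.toNat < z0.length := by omega
  -- the start value s of the while loop
  set s : Int := pvZGet z0 i with hs
  -- value of s
  have hs_cases : (left ≤ right ∧ s = min (pvZGet z (i - left)) (right - i + 1)) ∨
      (¬ left ≤ right ∧ s = 0) := by
    by_cases hLR : left ≤ right
    · left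
      refine ⟨hLR, ?_⟩
      rw [hs, hz0def, if_pos hLR, pvZGet_set_self z _ _ (by omega) hitoNat]
    · right
      refine ⟨hLR, ?_⟩
      rw [hs, hz0def, if_neg hLR]
      exact hzero i le_rfl
  have hzli : pvZGet z (i - left) ≥ 1 - i := by
    rcases eq_or_lt_of_le hl0 with h0 | h0
    · rw [← h0]; simp only [sub_zero]; rw [hzero i le_rfl]; omega
    · have := hzlow (i - left) (by omega) (by omega); omega
  have hs_low : 1 - i ≤ s := by
    rcases hs_cases with ⟨hLR, heq⟩ | ⟨hLR, heq⟩ <;> rw [heq] <;> omega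
  have hs_hi : i + s ≤ (cs.length : Int) := by
    rcases hs_cases with ⟨hLR, heq⟩ | ⟨hLR, heq⟩ <;> rw [heq] <;> omega
  -- facts about zi
  have hzi_ge : s ≤ zi := hzidef ▸ pvExtend_le cs _ i s
  have hzi_hi : i + zi ≤ (cs.length : Int) := hzidef ▸ pvExtend_bound cs _ i s hs_hi
  have hzi_matches := hzidef ▸ pvExtend_matches cs (cs.length : Int) i s
  -- reading the new array
  have hget1_i : pvZGet z1 i = zi := by
    rw [hz1def]; exact pvZGet_set_self z0 _ _ (by omega) hitoNat0
  have hget1_ne : ∀ j : Int, 0 ≤ j → j ≠ i → pvZGet z1 j = pvZGet z j := by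
    intro j hj0 hne
    rw [hz1def, pvZGet_set_ne z0 _ _ _ (by omega) hj0 hne, hz0def]
    split_ifs with hLR
    · exact pvZGet_set_ne z _ _ _ (by omega) hj0 hne
    · rfl
  -- hpos for the new index i
  have hposi : ∀ k : Int, 0 ≤ k → k < zi → pvCharEq cs k (i + k) = true := by
    intro k hk0 hk
    rcases le_or_gt s k with hks | hks
    · exact (hzi_matches k hks hk).2
    · -- k < s, so the copied prefix: s came from the Z-box
      rcases hs_cases with ⟨hLR, heq⟩ | ⟨hLR, heq⟩
      · have hsmin := heq
        have hs_pos : 0 < s := by omega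
        have hleft_pos : 0 < left := by
          by_contra hc
          have hle : left = 0 := by omega
          rw [hle] at hsmin
          simp only [sub_zero] at hsmin
          rw [hzero i le_rfl] at hsmin
          omega
        have hj1 : 1 ≤ i - left := by omega
        have hj2 : i - left < i := by omega
        have hk_lt : k < pvZGet z (i - left) := by omega
        have hk_r : i + k ≤ right := by omega
        have ha := hpos (i - left) hj1 hj2 k hk0 hk_lt
        have hb := hbox (i + k) (by omega) hk_r
        -- convert to pvAt equalities and chain
        have hkls : k < (cs.length : Int) := by omega
        have hjkls : i - left + k < (cs.length : Int) := by omega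
        have hikls : i + k < (cs.length : Int) := by omega
        rw [pvCharEq_iff_at cs _ _ hk0 hkls (by omega) hjkls] at ha
        have hb' : pvCharEq cs (i - left + k) (i + k) = true := by
          have : i + k - left = i - left + k := by ring
          rwa [this] at hb
        rw [pvCharEq_iff_at cs _ _ (by omega) hjkls (by omega) hikls] at hb'
        rw [pvCharEq_iff_at cs _ _ hk0 hkls (by omega) hikls]
        rw [ha, hb']
      · omega
  -- hper for the new index i
  have hperi : PySem.Int.mod (cs.length : Int) i = 0 → pvPeriod cs i →
      zi = (cs.length : Int) - i := by
    intro hmod hp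
    rw [hzidef]
    apply pvExtend_full cs _ i s hs_hi
    intro t hts htl
    rcases le_or_gt 0 t with ht0 | ht0
    · have := hp t ht0 (by omega)
      rwa [add_comm t i] at this
    · -- negative t: Python wraparound hits a congruent position
      obtain ⟨d, hd⟩ := (PySem.Int.mod_eq_zero_iff_dvd (cs.length : Int) i).mp hmod
      have hd1 : 1 ≤ d := by nlinarith
      obtain ⟨q, hq⟩ : ∃ q : Nat, (q : Int) * i = (cs.length : Int) - i :=
        ⟨(d - 1).toNat, by rw [Int.toNat_of_nonneg (by omega)]; nlinarith⟩
      have hcong := pvPeriod_congr cs i hi1 hp q (i + t) (by omega) (by rw [hq]; omega)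
      rw [pvCharEq_neg_iff_at cs t (i + t) (by omega) ht0 (by omega) (by omega)]
      have : i + t + (q : Int) * i = (cs.length : Int) + t := by rw [hq]; ring
      rw [this] at hcong
      exact hcong.symm
  -- assemble the invariant for both branches
  constructor
  · intro hupd
    refine ⟨by rw [hz1def]; simpa using hlen0, ?_, by omega, by omega, by omega, by omega,
      ?_, ?_, ?_, ?_, ?_, ?_⟩
    · rw [hget1_ne 0 le_rfl (by omega)]; exact hz0
    · -- new box at [i, i + zi - 1]
      intro k hk1 hk2
      have := hposi (k - i) (by omega) (by omega)
      have harith : i + (k - i) = k := by ring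
      rwa [harith] at this
    · intro j hj1 hj2
      rcases eq_or_lt_of_le (by omega : j ≤ i) with rfl | hlt
      · rw [hget1_i]; omega
      · rw [hget1_ne j (by omega) (by omega)]; exact hzlow j hj1 (by omega)
    · intro j hj1 hj2
      rcases eq_or_lt_of_le (by omega : j ≤ i) with rfl | hlt
      · rw [hget1_i]; omega
      · rw [hget1_ne j (by omega) (by omega)]; exact hzhigh j hj1 (by omega)
    · intro j hj1 hj2 k hk0 hk
      rcases eq_or_lt_of_le (by omega : j ≤ i) with rfl | hlt
      · rw [hget1_i] at hk; exact hposi k hk0 hk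
      · rw [hget1_ne j (by omega) (by omega)] at hk
        exact hpos j hj1 (by omega) k hk0 hk
    · intro j hj1 hj2 hjls hmod hp
      rcases eq_or_lt_of_le (by omega : j ≤ i) with rfl | hlt
      · rw [hget1_i]; exact hperi hmod hp
      · rw [hget1_ne j (by omega) (by omega)]
        exact hper j hj1 (by omega) hjls hmod hp
    · intro j hj
      rw [hget1_ne j (by omega) (by omega)]
      exact hzero j (by omega)
  · intro hkeep
    refine ⟨by rw [hz1def]; simpa using hlen0, ?_, hl0, by omega, hr0, hrls,
      hbox, ?_, ?_, ?_, ?_, ?_⟩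
    · rw [hget1_ne 0 le_rfl (by omega)]; exact hz0
    · intro j hj1 hj2
      rcases eq_or_lt_of_le (by omega : j ≤ i) with rfl | hlt
      · rw [hget1_i]; omega
      · rw [hget1_ne j (by omega) (by omega)]; exact hzlow j hj1 (by omega)
    · intro j hj1 hj2
      rcases eq_or_lt_of_le (by omega : j ≤ i) with rfl | hlt
      · rw [hget1_i]; omega
      · rw [hget1_ne j (by omega) (by omega)]; exact hzhigh j hj1 (by omega)
    · intro j hj1 hj2 k hk0 hk
      rcases eq_or_lt_of_le (by omega : j ≤ i) with rfl | hlt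
      · rw [hget1_i] at hk; exact hposi k hk0 hk
      · rw [hget1_ne j (by omega) (by omega)] at hk
        exact hpos j hj1 (by omega) k hk0 hk
    · intro j hj1 hj2 hjls hmod hp
      rcases eq_or_lt_of_le (by omega : j ≤ i) with rfl | hlt
      · rw [hget1_i]; exact hperi hmod hp
      · rw [hget1_ne j (by omega) (by omega)]
        exact hper j hj1 (by omega) hjls hmod hp
    · intro j hj
      rw [hget1_ne j (by omega) (by omega)]
      exact hzero j (by omega)

-- the facts about the final z array that the scan comparison needs
structure PvGoodZ (cs : List Char) (z : List Int) : Prop where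
  hz0 : pvZGet z 0 = 0
  hpos : ∀ j : Int, 1 ≤ j → j < (cs.length : Int) → ∀ k : Int, 0 ≤ k → k < pvZGet z j →
      pvCharEq cs k (j + k) = true
  hper : ∀ j : Int, 1 ≤ j → j < (cs.length : Int) → PySem.Int.mod (cs.length : Int) j = 0 →
      pvPeriod cs j → pvZGet z j = (cs.length : Int) - j

-- running the loop from an invariant state yields a good final z array
lemma pvZLoop_good (cs : List Char) :
    ∀ (i : Int) (z : List Int) (left right : Int), 1 ≤ i →
      PvInv cs z left right i →
      PvGoodZ cs (pvZLoop cs (cs.length : Int) i z left right).1 := by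
  intro i z left right
  induction i, z, left, right using pvZLoop.induct cs (cs.length : Int) with
  | case1 i z left right h z0 zi z1 hupd ih =>
    intro h1 hinv
    have hstep := (pvZLoop_step cs z left right i hinv h1 h).1 hupd
    simp only [z1, zi, z0] at hupd hstep ih
    simp only [dite_eq_ite] at hupd hstep ih
    rw [pvZLoop, dif_pos h]
    simp only []
    rw [if_pos hupd]
    exact ih (by omega) hstep
  | case2 i z left right h z0 zi z1 hupd ih =>
    intro h1 hinv
    have hstep := (pvZLoop_step cs z left right i hinv h1 h).2 hupd
    simp only [z1, zi, z0] at hupd hstep ih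
    simp only [dite_eq_ite] at hupd hstep ih
    rw [pvZLoop, dif_pos h]
    simp only []
    rw [if_neg hupd]
    exact ih (by omega) hstep
  | case3 i z left right h =>
    intro h1 hinv
    rw [pvZLoop, dif_neg h]
    refine ⟨hinv.hz0, ?_, ?_⟩
    · intro j hj1 hj2 k hk0 hk
      exact hinv.hpos j hj1 (by omega) k hk0 hk
    · intro j hj1 hj2 hmod hp
      exact hinv.hper j hj1 (by omega) hj2 hmod hp

-- tiling ↔ period, stated on the B side's comparison
lemma pvTile_iff_period (cs : List Char) (i : Int) (hi : 1 ≤ i) (hils : i < (cs.length : Int))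
    (hdvd : PySem.Int.mod (cs.length : Int) i = 0) :
    PySem.List.pyRepeat (PySem.List.slice cs none (some i)) (PySem.Int.floordiv (cs.length : Int) i) = cs
      ↔ pvPeriod cs i := by
  obtain ⟨p, rfl⟩ : ∃ p : Nat, i = (p : Int) := ⟨i.toNat, by omega⟩
  have hp1 : 1 ≤ p := by exact_mod_cast hi
  have hpN : p < cs.length := by exact_mod_cast hils
  have hpdvd : p ∣ cs.length := by
    have := (PySem.Int.mod_eq_zero_iff_dvd (cs.length : Int) (p : Int)).mp hdvd
    exact_mod_cast this
  have hqp : cs.length / p * p = cs.length := Nat.div_mul_cancel hpdvd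
  have hslice : PySem.List.slice cs none (some (p : Int)) = cs.take p :=
    PySem.List.slice_to_natCast cs p
  have hfd : PySem.Int.floordiv (cs.length : Int) (p : Int) = ((cs.length / p : Nat) : Int) :=
    PySem.Int.floordiv_natCast cs.length p
  have htlen : (cs.take p).length = p := by simp; omega
  have hrep : PySem.List.pyRepeat (cs.take p) ((cs.length / p : Nat) : Int)
      = (List.replicate (cs.length / p) (cs.take p)).flatten := by
    simp only [PySem.List.pyRepeat]
    congr 2
  have hreplen : ((List.replicate (cs.length / p) (cs.take p)).flatten).length = cs.length := by
    simp [List.length_flatten, htlen]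
    omega
  rw [hslice, hfd, hrep]
  constructor
  · intro h k hk0 hklt
    obtain ⟨a, rfl⟩ : ∃ a : Nat, k = (a : Int) := ⟨k.toNat, by omega⟩
    have hap : a + p < cs.length := by exact_mod_cast hklt
    have g1 : ((List.replicate (cs.length / p) (cs.take p)).flatten)[a]?
        = (cs.take p)[a % (cs.take p).length]? :=
      pvFlatGet _ _ _ (by rw [htlen]; omega)
    have g2 : ((List.replicate (cs.length / p) (cs.take p)).flatten)[a + p]?
        = (cs.take p)[(a + p) % (cs.take p).length]? :=
      pvFlatGet _ _ _ (by rw [htlen]; omega)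
    rw [h, htlen] at g1 g2
    rw [Nat.add_mod_right] at g2
    have hchars : cs[a]'(by omega) = cs[a + p]'(by omega) := by
      have := g1.trans g2.symm
      rw [List.getElem?_eq_getElem (by omega), List.getElem?_eq_getElem (by omega)] at this
      exact Option.some.inj this
    rw [show (a : Int) + (p : Int) = ((a + p : Nat) : Int) by push_cast; ring]
    rw [pvCharEq_iff_at cs _ _ (by omega) (by exact_mod_cast (by omega : a < cs.length))
      (by omega) (by exact_mod_cast hap)]
    rw [pvAt_nat cs a (by omega), pvAt_nat cs (a + p) hap]
    exact hchars
  · intro hper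
    have hN : ∀ k, k + p < cs.length → cs[k]? = cs[k + p]? := by
      intro k hk
      have hc := hper (k : Int) (by omega) (by exact_mod_cast hk)
      rw [show (k : Int) + (p : Int) = ((k + p : Nat) : Int) by push_cast; ring] at hc
      rw [pvCharEq_iff_at cs _ _ (by omega) (by exact_mod_cast (by omega : k < cs.length))
        (by omega) (by exact_mod_cast hk)] at hc
      rw [pvAt_nat cs k (by omega), pvAt_nat cs (k + p) hk] at hc
      rw [List.getElem?_eq_getElem (by omega), List.getElem?_eq_getElem (by omega), hc]
    have hget := pvPeriodGet cs p hp1 hN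
    apply List.ext_getElem?
    intro j
    rcases Nat.lt_or_ge j cs.length with hj | hj
    · rw [pvFlatGet _ _ _ (by rw [htlen]; omega), htlen]
      exact (hget j hj).symm
    · rw [List.getElem?_eq_none (by omega), List.getElem?_eq_none (by omega)]

-- with the final invariant, the two scans agree
lemma pvScan_eq_pvBScan (cs : List Char) (z : List Int) (hgood : PvGoodZ cs z) :
    ∀ i : Int, 1 ≤ i → pvScan (cs.length : Int) z i = pvBScan cs (cs.length : Int) i := by
  have key : ∀ n : Nat, ∀ i : Int, 1 ≤ i → ((cs.length : Int) - i).toNat = n →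
      pvScan (cs.length : Int) z i = pvBScan cs (cs.length : Int) i := by
    intro n
    induction n using Nat.strong_induction_on with
    | _ n ih =>
      intro i hi hn
      by_cases h : i < (cs.length : Int)
      · have hiff : (i + pvZGet z i = (cs.length : Int) ∧ PySem.Int.mod (cs.length : Int) i = 0) ↔
            (PySem.Int.mod (cs.length : Int) i = 0 ∧
              PySem.List.pyRepeat (PySem.List.slice cs none (some i))
                (PySem.Int.floordiv (cs.length : Int) i) = cs) := by
          constructor
          · rintro ⟨hsum, hmod⟩
            refine ⟨hmod, (pvTile_iff_period cs i hi h hmod).mpr ?_⟩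
            intro k hk0 hkl
            have := hgood.hpos i hi h k hk0 (by omega)
            rwa [add_comm i k] at this
          · rintro ⟨hmod, htile⟩
            have hp := (pvTile_iff_period cs i hi h hmod).mp htile
            have := hgood.hper i hi h hmod hp
            exact ⟨by omega, hmod⟩
        rw [pvScan, pvBScan, dif_pos h, dif_pos h]
        split_ifs with hA hB hB
        · rfl
        · exact absurd (hiff.mp hA) hB
        · exact absurd (hiff.mpr hB) hA
        · exact ih (((cs.length : Int) - (i + 1)).toNat) (by omega) (i + 1) (by omega) rfl
      · rw [pvScan, pvBScan, dif_neg h, dif_neg h]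
  exact fun i hi => key (((cs.length : Int) - i).toNat) i hi rfl

-- ===== VERDICT (by name: the statement is the Claim_ definition above) =====
-- the invariant holds at loop entry (i = 1) for a nonempty string
lemma pvInv_init (cs : List Char) (hne : 1 ≤ cs.length) :
    PvInv cs (List.replicate ((cs.length : Int)).toNat (0 : Int)) 0 0 1 := by
  refine ⟨by simp, pvZGet_replicate _ _, le_rfl, one_pos, le_rfl, by exact_mod_cast hne,
    ?_, ?_, ?_, ?_, ?_, fun j _ => pvZGet_replicate _ _⟩
  · intro k hk1 hk2
    have hk : k = 0 := le_antisymm hk2 hk1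
    subst hk
    norm_num
    exact (pvCharEq_iff_at cs 0 0 le_rfl (by exact_mod_cast hne) le_rfl
      (by exact_mod_cast hne)).mpr rfl
  · intro j hj1 hj2; omega
  · intro j hj1 hj2; omega
  · intro j hj1 hj2; omega
  · intro j hj1 hj2; omega

theorem find_max_substring_occurrence_spec : Claim_equal_find_max_substring_occurrence := by
  intro input_string _hdom
  unfold Spec_find_max_substring_occurrence
  show pvScan ((input_string.toList.length : Int))
      (pvZLoop input_string.toList ((input_string.toList.length : Int)) 1
        (List.replicate ((input_string.toList.length : Int)).toNat (0 : Int)) 0 0).1 0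
    = pvBScan input_string.toList ((input_string.toList.length : Int)) 1
  set cs := input_string.toList with hcs
  rcases Nat.eq_zero_or_pos cs.length with h0 | hpos
  · rw [pvScan, dif_neg (by omega), pvBScan, dif_neg (by omega)]
  · have hinv0 := pvInv_init cs hpos
    have hgood := pvZLoop_good cs 1 _ 0 0 le_rfl hinv0
    set zf := (pvZLoop cs ((cs.length : Int)) 1
      (List.replicate ((cs.length : Int)).toNat (0 : Int)) 0 0).1 with hzf
    have hstep0 : pvScan ((cs.length : Int)) zf 0 = pvScan ((cs.length : Int)) zf (0 + 1) := by
      rw [pvScan, dif_pos (by exact_mod_cast hpos)]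
      rw [if_neg]
      rintro ⟨hc1, _⟩
      rw [hgood.hz0] at hc1
      omega
    rw [hstep0]
    norm_num
    exact pvScan_eq_pvBScan cs zf hgood 1 le_rfl
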